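-- pv_equiv track=rewrite | github.com/geswanel/Algorithms | YaAlgoTrainings/Training5.0/BinSearch/E.py | fractionDiagonal
-- ===== SOURCE A (Python) =====
-- def fractionDiagonal(n):
--     l = 0
--     r = n
--     while l < r:
--         k = (l + r) // 2
--         if k * (k + 1) // 2 < n:
--             l = k + 1
--         else:
--             r = k
--
--     return l
-- ===== SOURCE B (Python) =====
-- def fractionDiagonal(n):
--     k = 0
--     while k * (k + 1) // 2 < n:
--         k += 1
--     return k
-- ===== Notes on version B (the rewrite author's own statement) =====
-- stated objective: alternative
-- what changed: Replaced the binary search over the interval from zero to n with a direct linear scan that increments k until its triangular number reaches n.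
import Mathlib
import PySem

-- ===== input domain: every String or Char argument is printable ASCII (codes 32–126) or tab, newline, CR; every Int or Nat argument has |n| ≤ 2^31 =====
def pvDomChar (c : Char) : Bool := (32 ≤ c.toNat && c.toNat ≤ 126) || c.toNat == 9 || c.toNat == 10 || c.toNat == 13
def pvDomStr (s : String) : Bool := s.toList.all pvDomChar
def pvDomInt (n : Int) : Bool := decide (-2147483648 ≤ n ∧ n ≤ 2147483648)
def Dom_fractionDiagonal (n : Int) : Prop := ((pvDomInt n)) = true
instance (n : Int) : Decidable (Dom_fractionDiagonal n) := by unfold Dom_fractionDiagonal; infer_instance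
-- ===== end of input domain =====

-- B replaces A's binary search with a linear scan over triangular numbers (alternative decomposition, same results).


-- ===== PORT A =====
-- loop 'while l < r' of A, state (l, r); k = (l+r)//2, branch on k*(k+1)//2 < n
def fdBinLoop (n l r : Int) : Int :=
  if h : l < r then
    let k := PySem.Int.floordiv (l + r) 2
    if PySem.Int.floordiv (k * (k + 1)) 2 < n then
      fdBinLoop n (k + 1) r
    else
      fdBinLoop n l k
  else
    l
termination_by (r - l).toNat
decreasing_by
  · have := PySem.Int.floordiv_two_mid_bounds (le_of_lt h)
    omega
  · have h2 : PySem.Int.floordiv (l + r) 2 < r := by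
      rw [PySem.Int.floordiv_lt_iff_lt_mul (by omega)]; omega
    omega

def fractionDiagonal (n : Int) : Int := fdBinLoop n 0 n

-- ===== PORT B =====
-- k*(k+1) is always ≥ 2*k over the integers; used only for B's loop termination
theorem fdLin_key (k : Int) : 2 * k ≤ k * (k + 1) := by nlinarith [sq_nonneg k, sq_nonneg (k - 1)]

-- loop 'while k*(k+1)//2 < n' of B, state k
def fdLinLoop (n k : Int) : Int :=
  if h : PySem.Int.floordiv (k * (k + 1)) 2 < n then
    fdLinLoop n (k + 1)
  else
    k
termination_by (n - k).toNat
decreasing_by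
  rw [PySem.Int.floordiv_lt_iff_lt_mul (by omega)] at h
  have := fdLin_key k
  omega

def fractionDiagonal_alt (n : Int) : Int := fdLinLoop n 0

-- ===== PRECONDITION & SPEC =====
def Spec_fractionDiagonal (n : Int) (out : Int) : Prop := out = fractionDiagonal_alt n
instance (n : Int) (out : Int) : Decidable (Spec_fractionDiagonal n out) := by unfold Spec_fractionDiagonal; infer_instance

-- ===== CLAIM (what is proved, stated in full; the proofs are below) =====
def Claim_equal_fractionDiagonal : Prop := ∀ (n : Int), Dom_fractionDiagonal n → Spec_fractionDiagonal n (fractionDiagonal n)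

-- ===== LEMMAS AND PROOFS =====
-- 'm is the least index ≥ 0 whose triangular number reaches n'
def fdIsLeast (n m : Int) : Prop :=
  0 ≤ m ∧ n ≤ PySem.Int.floordiv (m * (m + 1)) 2 ∧
    ∀ j, 0 ≤ j → j < m → PySem.Int.floordiv (j * (j + 1)) 2 < n

theorem fdIsLeast_unique {n m₁ m₂ : Int} (h₁ : fdIsLeast n m₁) (h₂ : fdIsLeast n m₂) :
    m₁ = m₂ := by
  obtain ⟨a0, a1, a2⟩ := h₁
  obtain ⟨b0, b1, b2⟩ := h₂
  rcases lt_trichotomy m₁ m₂ with h | h | h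
  · exact absurd a1 (not_le.mpr (b2 _ a0 h))
  · exact h
  · exact absurd b1 (not_le.mpr (a2 _ b0 h))

theorem fdTri_mono {j k : Int} (hj : 0 ≤ j) (hjk : j ≤ k) :
    PySem.Int.floordiv (j * (j + 1)) 2 ≤ PySem.Int.floordiv (k * (k + 1)) 2 := by
  rw [PySem.Int.floordiv_eq_ediv_of_pos (by omega), PySem.Int.floordiv_eq_ediv_of_pos (by omega)]
  have : j * (j + 1) ≤ k * (k + 1) := by nlinarith
  omega

theorem fdLinLoop_isLeast (n : Int) :
    ∀ k, 0 ≤ k → (∀ j, 0 ≤ j → j < k → PySem.Int.floordiv (j * (j + 1)) 2 < n) →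
      fdIsLeast n (fdLinLoop n k) := by
  intro k
  induction k using fdLinLoop.induct n with
  | case1 k h ih =>
    intro hk hbelow
    rw [fdLinLoop, dif_pos h]
    refine ih (by omega) ?_
    intro j hj hjk
    by_cases heq : j = k
    · exact heq ▸ h
    · exact hbelow j hj (by omega)
  | case2 k h =>
    intro hk hbelow
    rw [fdLinLoop, dif_neg h]
    exact ⟨hk, not_lt.mp h, hbelow⟩

theorem fdBinLoop_eq (n l r : Int) (h : l < r) :
    fdBinLoop n l r =
      if PySem.Int.floordiv
          (PySem.Int.floordiv (l + r) 2 * (PySem.Int.floordiv (l + r) 2 + 1)) 2 < n then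
        fdBinLoop n (PySem.Int.floordiv (l + r) 2 + 1) r
      else
        fdBinLoop n l (PySem.Int.floordiv (l + r) 2) := by
  rw [fdBinLoop]
  simp [h]

theorem fdBinLoop_isLeast (n : Int) :
    ∀ l r, 0 ≤ l → l ≤ r → n ≤ PySem.Int.floordiv (r * (r + 1)) 2 →
      (∀ j, 0 ≤ j → j < l → PySem.Int.floordiv (j * (j + 1)) 2 < n) →
      fdIsLeast n (fdBinLoop n l r) := by
  intro l r
  induction l, r using fdBinLoop.induct n with
  | case1 l r h k hbranch ih =>
    have hk : k = PySem.Int.floordiv (l + r) 2 := rfl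
    clear_value k
    subst hk
    intro h0 hlr hr hbelow
    have hmid := PySem.Int.floordiv_two_mid_bounds (le_of_lt h)
    have hstrict : PySem.Int.floordiv (l + r) 2 < r := by
      rw [PySem.Int.floordiv_lt_iff_lt_mul (by omega)]; omega
    rw [fdBinLoop_eq n l r h, if_pos hbranch]
    refine ih (by omega) (by omega) hr ?_
    intro j hj hjk
    by_cases heq : j = PySem.Int.floordiv (l + r) 2
    · exact heq ▸ hbranch
    · by_cases hl : j < l
      · exact hbelow j hj hl
      · exact lt_of_le_of_lt (fdTri_mono hj (by omega)) hbranch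
  | case2 l r h k hbranch ih =>
    have hk : k = PySem.Int.floordiv (l + r) 2 := rfl
    clear_value k
    subst hk
    intro h0 hlr hr hbelow
    have hmid := PySem.Int.floordiv_two_mid_bounds (le_of_lt h)
    rw [fdBinLoop_eq n l r h, if_neg hbranch]
    exact ih h0 (by omega) (not_lt.mp hbranch) hbelow
  | case3 l r h =>
    intro h0 hlr hr hbelow
    rw [fdBinLoop, dif_neg h]
    have hlr' : l = r := by omega
    exact ⟨h0, hlr' ▸ hr, hbelow⟩

-- ===== VERDICT (by name: the statement is the Claim_ definition above) =====
theorem fractionDiagonal_spec : Claim_equal_fractionDiagonal := by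
  intro n _
  unfold Spec_fractionDiagonal fractionDiagonal fractionDiagonal_alt
  by_cases hn : n ≤ 0
  · rw [fdBinLoop, dif_neg (by omega)]
    rw [fdLinLoop, dif_neg]
    rw [PySem.Int.floordiv_lt_iff_lt_mul (by omega)]
    omega
  · have hA : fdIsLeast n (fdBinLoop n 0 n) := by
      refine fdBinLoop_isLeast n 0 n le_rfl (by omega) ?_ (by omega)
      rw [PySem.Int.le_floordiv_iff_mul_le (by omega)]
      nlinarith
    have hB : fdIsLeast n (fdLinLoop n 0) :=
      fdLinLoop_isLeast n 0 le_rfl (by omega)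
    exact fdIsLeast_unique hA hB
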